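-- pv_equiv track=rewrite | github.com/PandaxCloud/cs61a | hw/hw03/discussion.py | mario_number
-- ===== SOURCE A (Python) =====
-- def mario_number(level):
--     if len(level) < 3:
--         return 1
--     else:
--         if level[1] == 'P':
--             if level[2] == 'P':
--                 return 0
--             else:
--                 return mario_number(level[2:])
--         else:
--             if level[2] == 'P':
--                 return mario_number(level[1:])
--             else:
--                 return mario_number(level[2:]) + mario_number(level[1:])
-- ===== SOURCE B (Python) =====
-- def mario_number(level):
--     # One reverse pass, O(n): keep counts for the two shortest suffixes seen so far.
--     d1, d2 = 1, 1          # paths from positions i+1 and i+2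
--     c1 = c2 = None         # characters at positions i+1 and i+2
--     for ch in reversed(level):
--         if c2 is not None:
--             v = (d1 if c1 != 'P' else 0) + (d2 if c2 != 'P' else 0)
--             d1, d2 = v, d1
--         c1, c2 = ch, c1
--     return d1
-- ===== Notes on version B (the rewrite author's own statement) =====
-- stated objective: faster
-- what changed: Replaced the branching double recursion on suffixes by a single reverse pass that keeps the path counts of the two shortest suffixes seen so far (linear DP); intended as asymptotically faster (A is exponential and timed out at n=64 where B returned; B measured 3-6x already at n=16, the largest size A finishes).
import Mathlib
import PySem

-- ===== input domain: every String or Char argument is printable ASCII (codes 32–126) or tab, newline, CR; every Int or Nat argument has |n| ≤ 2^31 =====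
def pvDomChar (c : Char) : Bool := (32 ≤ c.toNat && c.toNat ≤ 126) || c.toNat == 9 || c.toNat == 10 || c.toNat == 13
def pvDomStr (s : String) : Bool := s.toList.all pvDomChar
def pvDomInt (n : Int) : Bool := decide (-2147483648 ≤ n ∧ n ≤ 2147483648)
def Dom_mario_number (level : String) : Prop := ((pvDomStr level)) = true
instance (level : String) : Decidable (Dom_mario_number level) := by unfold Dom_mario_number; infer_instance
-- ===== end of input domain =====

-- B replaces A's exponential double recursion by one linear reverse pass keeping the counts of the two shortest suffixes (intended as faster; measured 3-6x already at n=16, the largest size A finishes; A timed out beyond that).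

-- ===== PORT A =====
-- A recurses on suffixes; a list of length ≥ 3 is a::b::c::rest, level[1]=b, level[2]=c,
-- level[1:] = b::c::rest, level[2:] = c::rest; lists of length < 3 return 1.
def marioA : List Char → Int
  | _ :: b :: c :: rest =>
      if b = 'P' then
        if c = 'P' then 0 else marioA (c :: rest)
      else
        if c = 'P' then marioA (b :: c :: rest)
        else marioA (c :: rest) + marioA (b :: c :: rest)
  | _ => 1

def mario_number (level : String) : Int := marioA level.toList

-- ===== PORT B =====
-- state (d1, d2, c1, c2): counts for suffixes starting one and two steps before the
-- current position, and the last two characters seen (None before they exist).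
def marioBstep : Int × Int × Option Char × Option Char → Char → Int × Int × Option Char × Option Char
  | (d1, d2, c1, c2), ch =>
    match c2 with
    | none => (d1, d2, some ch, c1)
    | some _ =>
      -- Python's `c1 != 'P'` compares an Optional against a char: None ≠ 'P'
      ((if c1 ≠ some 'P' then d1 else 0) + (if c2 ≠ some 'P' then d2 else 0), d1, some ch, c1)

def mario_number_alt (level : String) : Int :=
  (level.toList.reverse.foldl marioBstep (1, 1, none, none)).1

-- ===== PRECONDITION & SPEC =====
def Spec_mario_number (level : String) (out : Int) : Prop := out = mario_number_alt level
instance (level : String) (out : Int) : Decidable (Spec_mario_number level out) := by unfold Spec_mario_number; infer_instance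

-- ===== CLAIM (what is proved, stated in full; the proofs are below) =====
def Claim_equal_mario_number : Prop := ∀ (level : String), Dom_mario_number level → Spec_mario_number level (mario_number level)

-- ===== LEMMAS AND PROOFS =====

-- Invariant of the reverse scan: after consuming l (back to front) the state holds
-- marioA of l, marioA of its tail, and the first two characters of l.
theorem marioB_invariant (l : List Char) :
    l.reverse.foldl marioBstep (1, 1, none, none)
      = (marioA l, marioA l.tail, l.head?, l.tail.head?) := by
  induction l with
  | nil => simp [marioA]
  | cons a l ih =>
    rw [List.reverse_cons, List.foldl_append, ih]
    match l with
    | [] => simp [marioA, marioBstep]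
    | [b] => simp [marioA, marioBstep]
    | b :: c :: rest =>
      by_cases hb : b = 'P' <;> by_cases hc : c = 'P' <;>
        simp [marioBstep, marioA, hb, hc] <;> omega

-- ===== VERDICT (by name: the statement is the Claim_ definition above) =====
theorem mario_number_spec : Claim_equal_mario_number := by
  intro level _
  unfold Spec_mario_number mario_number mario_number_alt
  rw [marioB_invariant]
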